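-- pv_equiv track=rewrite | github.com/cielavenir/checkio | scientific-expedition/double-substring.py | double_substring
-- ===== SOURCE A (Python) =====
-- from collections import defaultdict
-- import bisect
--
-- B=999999937
--
-- P=1000000007
--
-- class KeyRange(object):
-- 	def __init__(self, lo, hi, key):
-- 		self.lo = lo
-- 		self.hi = hi
-- 		self.key = key
-- 	def __len__(self):
-- 		return self.hi-self.lo
-- 	def __getitem__(self, k):
-- 		return self.key(k)
--
-- def gen_hash(s,hash):
-- 	c=0
-- 	for i in range(len(s)):
-- 		c=(c*B+s[i])%P
-- 		hash[i]=c
--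
-- class Checker:
-- 	def __init__(self,v):
-- 		self.v=v
-- 		self.i=None
-- 	def chk(self,k):
-- 		r=defaultdict(list)
-- 		Bk=pow(B,k,P)
-- 		for i in range(k-1,len(self.v)):
-- 			hsh=(self.v[i]-(self.v[i-k] if i>=k else 0)*Bk%P)%P
-- 			r[hsh].append(i)
-- 		for v in r.values():
-- 			if v[-1]-v[0]>=k:
-- 				self.i=v[0]
-- 				return 0
-- 		return 1
--
-- def double_substring(s):
-- 	if not s:return 0
-- 	s=[ord(e) for e in s]
-- 	ls=len(s)
-- 	v=[0]*ls
-- 	gen_hash(s,v)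
-- 	check=Checker(v)
-- 	n=bisect.bisect_left(KeyRange(0,ls,check.chk),1)-1
-- 	return n
-- ===== SOURCE B (Python) =====
-- B = 999999937
-- P = 1000000007
--
--
-- def double_substring(s):
--     # Binary search on the answer; a candidate length k is tested by hashing
--     # every window directly (Horner over its characters), sorting the
--     # (hash, start) pairs by hash and scanning each equal-hash run for a
--     # start >= k past the run's first start.  No prefix-hash array, no
--     # rolling update, no dict grouping.
--     n = len(s)
--     if n == 0:
--         return 0
--
--     def window_hash(j, k):
--         h = 0
--         for c in s[j:j + k]:
--             h = (h * B + ord(c)) % P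
--         return h
--
--     def has_repeat(k):
--         pairs = sorted(((window_hash(j, k), j) for j in range(n - k + 1)),
--                        key=lambda p: p[0])
--         cur = None
--         first = 0
--         for h, j in pairs:
--             if cur == h:
--                 if j - first >= k:
--                     return True
--             else:
--                 cur, first = h, j
--         return False
--
--     lo, hi = 0, n
--     while lo < hi:
--         mid = (lo + hi) // 2
--         if has_repeat(mid):
--             lo = mid + 1
--         else:
--             hi = mid
--     return lo - 1
-- ===== Notes on version B (the rewrite author's own statement) =====
-- stated objective: alternative
-- what changed: B replaces A's prefix-hash array + per-length rolling-hash pass that groups window starts in a defaultdict of position lists (driven through a Checker class and bisect over a KeyRange proxy) by a per-length sort-and-scan: each window is hashed directly by Horner evaluation over its characters, the (hash, start) pairs are sorted by hash, and equal-hash runs are scanned for a start at distance >= k from the run's first start, inside an explicit binary-search loop.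
import Mathlib
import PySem

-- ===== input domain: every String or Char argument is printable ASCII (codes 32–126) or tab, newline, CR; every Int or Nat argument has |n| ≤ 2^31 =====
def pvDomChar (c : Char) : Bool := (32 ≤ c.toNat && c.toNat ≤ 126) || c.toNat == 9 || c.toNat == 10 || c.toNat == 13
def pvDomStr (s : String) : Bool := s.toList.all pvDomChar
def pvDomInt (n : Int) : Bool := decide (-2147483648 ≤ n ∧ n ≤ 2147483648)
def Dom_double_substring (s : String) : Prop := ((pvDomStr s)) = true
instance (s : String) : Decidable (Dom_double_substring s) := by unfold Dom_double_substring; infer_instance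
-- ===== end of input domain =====

-- B replaces A's prefix-hash array + per-length rolling-hash pass grouping starts in a
-- dict of position lists (via a Checker class and bisect over a KeyRange proxy) by a
-- per-length sort-and-scan: each window hashed directly by Horner evaluation, the
-- (hash, start) pairs sorted by hash, equal-hash runs scanned for a start ≥ k past the
-- run's first start, inside an explicit binary-search loop; same value on every input.

-- ===== PORT A =====
def pvB : Int := 999999937
def pvP : Int := 1000000007

def pvOrds (s : String) : List Int := s.toList.map (fun c => (c.toNat : Int))

-- gen_hash: Python preallocates v=[0]*ls and writes v[i]=c in order; ported as building
-- the list left to right (same values, same order).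
def pvGenHash (xs : List Int) : List Int :=
  (xs.foldl (fun (p : Int × List Int) x =>
      let c := PySem.Int.mod (p.1 * pvB + x) pvP
      (c, p.2 ++ [c])) ((0 : Int), ([] : List Int))).2

-- the 'for v in r.values(): if v[-1]-v[0]>=k: return 0 / return 1' loop of Checker.chk
-- (self.i is written but never read by double_substring, so it is dropped).
def pvChkScan (k : Int) : List (List Int) → Int
  | [] => 1
  | g :: rest =>
      if PySem.List.pyGetD g (-1) 0 - PySem.List.pyGetD g 0 0 ≥ k then 0
      else pvChkScan k rest

-- Checker.chk; list indexing uses pyGetD: every index reached (-1 ≤ i < len, possibly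
-- negative, Python wrap-around) is in range, proved in the lemmas below, so Python
-- never raises here and pyGetD is exact.
def pvChk (v : List Int) (k : Int) : Int :=
  let Bk := PySem.Int.powMod pvB k.toNat pvP  -- pow(B,k,P); k ≥ 0 on every call
  let r : PySem.Dict Int (List Int) :=
    (PySem.List.pyRange (k - 1) (v.length : Int)).foldl
      (fun d i =>
        let hsh := PySem.Int.mod
          (PySem.List.pyGetD v i 0 -
            PySem.Int.mod ((if i ≥ k then PySem.List.pyGetD v (i - k) 0 else 0) * Bk) pvP) pvP
        d.modify hsh [] (fun g => g ++ [i]))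
      PySem.Dict.empty
  pvChkScan k r.values

-- bisect.bisect_left(KeyRange(0,ls,chk),1): the standard bisect_left loop probing chk(mid)<1.
def pvBisect (v : List Int) (lo hi : Int) : Int :=
  if h : lo < hi then
    let mid := PySem.Int.floordiv (lo + hi) 2
    if pvChk v mid < 1 then pvBisect v (mid + 1) hi else pvBisect v lo mid
  else lo
termination_by (hi - lo).toNat
decreasing_by
  · have h1 := (PySem.Int.floordiv_two_mid_bounds (le_of_lt h)).1
    omega
  · have h2 := (PySem.Int.floordiv_lt_iff_lt_mul (a := lo + hi) (b := 2) (q := hi) (by norm_num)).2 (by omega)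
    omega

def double_substring (s : String) : Int :=
  if s.toList = [] then 0
  else
    let xs := pvOrds s
    let v := pvGenHash xs
    pvBisect v 0 (xs.length : Int) - 1

-- ===== PORT B =====
-- window_hash(j, k): Horner evaluation over the slice s[j:j+k].
def pvWinHash (cs : List Char) (j kk : Int) : Int :=
  (PySem.List.slice cs (some j) (some (j + kk))).foldl
    (fun h c => PySem.Int.mod (h * pvB + (c.toNat : Int)) pvP) 0

-- the generator ((window_hash(j, k), j) for j in range(n - k + 1))
def pvPairs (cs : List Char) (kk : Int) : List (Int × Int) :=
  (PySem.List.pyRange 0 ((cs.length : Int) - kk + 1) 1).map (fun j => (pvWinHash cs j kk, j))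

-- the 'for h, j in pairs' run scan with early return True
def pvScan (kk : Int) (cur : Option Int) (first : Int) : List (Int × Int) → Bool
  | [] => false
  | p :: rest =>
      if cur = some p.1 then
        (if p.2 - first ≥ kk then true else pvScan kk cur first rest)
      else pvScan kk (some p.1) p.2 rest

-- has_repeat(k): sorted(pairs, key=lambda p: p[0]) then the run scan (cur starts as None).
def pvHasRepeat (cs : List Char) (kk : Int) : Bool :=
  pvScan kk none 0 (PySem.List.sorted (pvPairs cs kk) (fun p => p.1))

-- the explicit while lo < hi binary-search loop
def pvSearch (cs : List Char) (lo hi : Int) : Int :=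
  if h : lo < hi then
    let mid := PySem.Int.floordiv (lo + hi) 2
    if pvHasRepeat cs mid then pvSearch cs (mid + 1) hi else pvSearch cs lo mid
  else lo
termination_by (hi - lo).toNat
decreasing_by
  · have h1 := (PySem.Int.floordiv_two_mid_bounds (le_of_lt h)).1
    omega
  · have h2 := (PySem.Int.floordiv_lt_iff_lt_mul (a := lo + hi) (b := 2) (q := hi) (by norm_num)).2 (by omega)
    omega

def double_substring_alt (s : String) : Int :=
  if (s.toList.length : Int) = 0 then 0
  else pvSearch s.toList 0 (s.toList.length : Int) - 1

-- ===== PRECONDITION & SPEC =====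
def Spec_double_substring (s : String) (out : Int) : Prop := out = double_substring_alt s
instance (s : String) (out : Int) : Decidable (Spec_double_substring s out) := by unfold Spec_double_substring; infer_instance

-- ===== CLAIM (what is proved, stated in full; the proofs are below) =====
def Claim_equal_double_substring : Prop := ∀ (s : String), Dom_double_substring s → Spec_double_substring s (double_substring s)

-- ===== LEMMAS AND PROOFS =====

def pvStep (a x : Int) : Int := (a * pvB + x) % pvP
def pvRaw (a x : Int) : Int := a * pvB + x
def pvHm (l : List Int) : Int := l.foldl pvStep 0
def pvU (l : List Int) : Int := l.foldl pvRaw 0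
def pvWin (xs : List Int) (j k : Nat) : List Int := (xs.drop j).take k
def pvF (xs : List Int) (k j : Nat) : Int := pvHm (pvWin xs j k)

theorem pvP_pos : (0:Int) < pvP := by norm_num [pvP]

theorem pvMod_eq (a : Int) : PySem.Int.mod a pvP = a % pvP :=
  PySem.Int.mod_eq_emod_of_pos pvP_pos

theorem pvStep_nonneg (a x : Int) : 0 ≤ pvStep a x :=
  Int.emod_nonneg _ (by norm_num [pvP])

theorem pvStep_lt (a x : Int) : pvStep a x < pvP :=
  Int.emod_lt_of_pos _ pvP_pos

theorem pvFoldStep_range (l : List Int) (a : Int) (h0 : 0 ≤ a) (h1 : a < pvP) :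
    0 ≤ l.foldl pvStep a ∧ l.foldl pvStep a < pvP := by
  induction l generalizing a with
  | nil => exact ⟨h0, h1⟩
  | cons x t ih => exact ih _ (pvStep_nonneg a x) (pvStep_lt a x)

theorem pvHm_range (l : List Int) : 0 ≤ pvHm l ∧ pvHm l < pvP :=
  pvFoldStep_range l 0 le_rfl pvP_pos

theorem pvRaw_from (l : List Int) (a : Int) :
    l.foldl pvRaw a = a * pvB ^ l.length + pvU l := by
  induction l generalizing a with
  | nil => simp [pvU]
  | cons x t ih =>
      have hx : pvU (x :: t) = t.foldl pvRaw x := by simp [pvU, pvRaw]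
      rw [List.foldl_cons, ih (pvRaw a x), hx, ih x]
      simp [pvRaw, List.length_cons]
      ring

theorem pvU_append (l1 l2 : List Int) :
    pvU (l1 ++ l2) = pvU l1 * pvB ^ l2.length + pvU l2 := by
  rw [pvU, List.foldl_append, pvRaw_from]; rfl

theorem pvFoldStep_modEq (l : List Int) (a b : Int) (h : a ≡ b [ZMOD pvP]) :
    l.foldl pvStep a ≡ l.foldl pvRaw b [ZMOD pvP] := by
  induction l generalizing a b with
  | nil => exact h
  | cons x t ih =>
      refine ih _ _ ?_
      have h1 : pvStep a x ≡ a * pvB + x [ZMOD pvP] := Int.emod_emod_of_dvd _ dvd_rfl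
      exact h1.trans ((h.mul_right pvB).add_right x)

theorem pvHm_modEq (l : List Int) : pvHm l ≡ pvU l [ZMOD pvP] :=
  pvFoldStep_modEq l 0 0 Int.ModEq.rfl

theorem pvEq_of_modEq (a b : Int) (h : a ≡ b [ZMOD pvP])
    (ha0 : 0 ≤ a) (ha1 : a < pvP) (hb0 : 0 ≤ b) (hb1 : b < pvP) : a = b := by
  have := h
  unfold Int.ModEq at this
  rwa [Int.emod_eq_of_lt ha0 ha1, Int.emod_eq_of_lt hb0 hb1] at this

theorem pvGenAux (l : List Int) (a : Int) (acc : List Int) :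
    (l.foldl (fun (p : Int × List Int) x => (pvStep p.1 x, p.2 ++ [pvStep p.1 x])) (a, acc)).2
      = acc ++ (List.range l.length).map (fun i => (l.take (i+1)).foldl pvStep a) := by
  induction l generalizing a acc with
  | nil => simp
  | cons x t ih =>
      rw [List.foldl_cons, ih]
      have hr : List.range (t.length + 1) = 0 :: (List.range t.length).map Nat.succ :=
        List.range_succ_eq_map
      simp only [List.length_cons, hr, List.map_cons, List.map_map]
      have h1 : ∀ i : Nat, ((x :: t).take (i+1+1)).foldl pvStep a
          = (t.take (i+1)).foldl pvStep (pvStep a x) := by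
        intro i; simp [List.take_succ_cons]
      simp only [Function.comp_def, Nat.succ_eq_add_one, h1]
      simp

theorem pvGenHash_eq (xs : List Int) :
    pvGenHash xs = (List.range xs.length).map (fun i => pvHm (xs.take (i+1))) := by
  unfold pvGenHash
  simp only [pvMod_eq]
  exact pvGenAux xs 0 []

theorem pvGenHash_length (xs : List Int) : (pvGenHash xs).length = xs.length := by
  rw [pvGenHash_eq]; simp

theorem pvGenHash_get (xs : List Int) (i : Nat) (h : i < xs.length) :
    PySem.List.pyGetD (pvGenHash xs) (i : Int) 0 = pvHm (xs.take (i+1)) := by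
  have hlen : ((i : Int)) < ((pvGenHash xs).length : Int) := by
    rw [pvGenHash_length]; exact_mod_cast h
  rw [PySem.List.pyGetD_eq_getElem _ _ (by positivity) hlen]
  simp [pvGenHash_eq]

theorem pvRangeShift (m : Nat) : ∀ a : Int, PySem.List.pyRange a (a + m) 1
    = (List.range m).map (fun (t : Nat) => a + (t : Int)) := by
  induction m with
  | zero =>
      intro a
      rw [show a + ((0:Nat):Int) = a by simp]
      simp [PySem.List.pyRange_one_eq_nil le_rfl]
  | succ t ih =>
      intro a
      rw [PySem.List.pyRange_one_cons (by push_cast; omega)]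
      rw [show a + ((t+1 : Nat) : Int) = (a+1) + (t : Nat) by push_cast; ring]
      rw [ih (a+1), List.range_succ_eq_map, List.map_cons, List.map_map]
      refine congrArg₂ List.cons (by simp) ?_
      refine List.map_congr_left ?_
      intro u _
      simp only [Function.comp_def]
      push_cast
      ring

theorem pvWin_zero (xs : List Int) (k : Nat) : pvWin xs 0 k = xs.take k := by
  simp [pvWin]

theorem pvTake_split (xs : List Int) (j k : Nat) :
    xs.take (j+k) = xs.take j ++ pvWin xs j k := List.take_add

theorem pvWin_length (xs : List Int) (j k : Nat) (h : j + k ≤ xs.length) :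
    (pvWin xs j k).length = k := by
  simp [pvWin]; omega

theorem pvBk_eq (k : Nat) : PySem.Int.powMod pvB k pvP = (pvB ^ k) % pvP :=
  PySem.Int.powMod_eq_emod pvB k pvP_pos

theorem pvHshA_eq (xs : List Int) (k : Nat) (hk : 1 ≤ k) (i : Int)
    (hi1 : (k:Int) - 1 ≤ i) (hi2 : i < xs.length) :
    PySem.Int.mod (PySem.List.pyGetD (pvGenHash xs) i 0 -
        PySem.Int.mod ((if i ≥ (k:Int) then PySem.List.pyGetD (pvGenHash xs) (i-(k:Int)) 0 else 0)
          * PySem.Int.powMod pvB k pvP) pvP) pvP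
      = pvF xs k (i+1-k).toNat := by
  set n := xs.length with hn
  have hF0 : 0 ≤ pvF xs k (i+1-k).toNat ∧ pvF xs k (i+1-k).toNat < pvP := pvHm_range _
  by_cases hik : i ≥ (k:Int)
  · have hiN : i = ((i.toNat : Nat) : Int) := by omega
    set iN := i.toNat with hiN'
    have hj : (i+1-k).toNat = iN + 1 - k := by omega
    set j := iN + 1 - k with hj'
    have hjk : j + k = iN + 1 := by omega
    have hiNn : iN < n := by omega
    have hjn : j ≤ n := by omega
    have hv1 : PySem.List.pyGetD (pvGenHash xs) i 0 = pvHm (xs.take (iN+1)) := by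
      rw [hiN]; exact pvGenHash_get xs iN (by omega)
    have hv2 : PySem.List.pyGetD (pvGenHash xs) (i - k) 0 = pvHm (xs.take j) := by
      have : i - (k:Int) = ((j - 1 : Nat) : Int) := by omega
      rw [this, pvGenHash_get xs (j-1) (by omega)]
      have h11 : j - 1 + 1 = j := by omega
      rw [h11]
    rw [if_pos hik, hv1, hv2, hj]
    have hsplit : xs.take (iN+1) = xs.take j ++ pvWin xs j k := by
      rw [← hjk]; exact pvTake_split xs j k
    have hwl : (pvWin xs j k).length = k := pvWin_length xs j k (by omega)
    have h1 : pvHm (xs.take (iN+1)) ≡ pvU (xs.take j) * pvB ^ k + pvU (pvWin xs j k) [ZMOD pvP] := by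
      rw [hsplit]
      have := pvHm_modEq (xs.take j ++ pvWin xs j k)
      rwa [pvU_append, hwl] at this
    have h2 : PySem.Int.mod (pvHm (xs.take j) * PySem.Int.powMod pvB k pvP) pvP
        ≡ pvU (xs.take j) * pvB ^ k [ZMOD pvP] := by
      rw [pvMod_eq, pvBk_eq]
      calc (pvHm (xs.take j) * (pvB ^ k % pvP)) % pvP
          ≡ pvHm (xs.take j) * (pvB ^ k % pvP) [ZMOD pvP] := Int.emod_emod_of_dvd _ dvd_rfl
        _ ≡ pvU (xs.take j) * pvB ^ k [ZMOD pvP] :=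
            (pvHm_modEq _).mul (Int.emod_emod_of_dvd _ dvd_rfl)
    have h3 : PySem.Int.mod (pvHm (xs.take (iN+1)) -
        PySem.Int.mod (pvHm (xs.take j) * PySem.Int.powMod pvB k pvP) pvP) pvP
        ≡ pvU (pvWin xs j k) [ZMOD pvP] := by
      rw [pvMod_eq]
      calc (pvHm (xs.take (iN+1)) - PySem.Int.mod (pvHm (xs.take j) * PySem.Int.powMod pvB k pvP) pvP) % pvP
          ≡ pvHm (xs.take (iN+1)) - PySem.Int.mod (pvHm (xs.take j) * PySem.Int.powMod pvB k pvP) pvP [ZMOD pvP] :=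
            Int.emod_emod_of_dvd _ dvd_rfl
        _ ≡ (pvU (xs.take j) * pvB ^ k + pvU (pvWin xs j k)) - pvU (xs.take j) * pvB ^ k [ZMOD pvP] :=
            h1.sub h2
        _ = pvU (pvWin xs j k) := by ring
    refine pvEq_of_modEq _ _ (h3.trans (pvHm_modEq _).symm) ?_ ?_ (hj ▸ hF0.1) (hj ▸ hF0.2)
    · rw [pvMod_eq]; exact Int.emod_nonneg _ (by norm_num [pvP])
    · rw [pvMod_eq]; exact Int.emod_lt_of_pos _ pvP_pos
  · have hieq : i = ((k - 1 : Nat) : Int) := by omega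
    have hj0 : (i+1-k).toNat = 0 := by omega
    rw [if_neg hik, hj0, zero_mul]
    have hmod0 : PySem.Int.mod 0 pvP = 0 := by rw [pvMod_eq]; simp
    rw [hmod0, sub_zero, hieq, pvGenHash_get xs (k-1) (by omega)]
    have htk : k - 1 + 1 = k := by omega
    rw [htk, pvMod_eq, pvF, pvWin_zero]
    exact Int.emod_eq_of_lt (pvHm_range _).1 (pvHm_range _).2

theorem pvChkScan_eq (k : Int) (gs : List (List Int)) :
    pvChkScan k gs =
      if gs.any (fun g => decide (PySem.List.pyGetD g (-1) 0 - PySem.List.pyGetD g 0 0 ≥ k))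
      then 0 else 1 := by
  induction gs with
  | nil => simp [pvChkScan]
  | cons g rest ih =>
      unfold pvChkScan
      by_cases hc : PySem.List.pyGetD g (-1) 0 - PySem.List.pyGetD g 0 0 ≥ k
      · simp [hc]
      · simp [hc, ih]

def pvGroupPairs (xs : List Int) (k c : Nat) : List (Int × Int) :=
  (List.range c).map (fun j => (pvF xs k j, (k : Int) - 1 + (j : Int)))

def pvGDict (xs : List Int) (k c : Nat) : PySem.Dict Int (List Int) :=
  (pvGroupPairs xs k c).foldl (fun d p => d.modify p.1 [] (fun g => g ++ [p.2])) PySem.Dict.empty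

theorem pvChkA_eq (xs : List Int) (k : Nat) (hk : 1 ≤ k) (hkn : k ≤ xs.length) :
    pvChk (pvGenHash xs) (k : Int) = pvChkScan (k : Int) (pvGDict xs k (xs.length - k + 1)).values := by
  have hraw : pvChk (pvGenHash xs) (k : Int) = pvChkScan (k : Int)
      ((PySem.List.pyRange ((k : Int) - 1) ((pvGenHash xs).length : Int)).foldl
        (fun (d : PySem.Dict Int (List Int)) i =>
          d.modify (PySem.Int.mod (PySem.List.pyGetD (pvGenHash xs) i 0 -
              PySem.Int.mod ((if i ≥ (k : Int) then
                  PySem.List.pyGetD (pvGenHash xs) (i - (k : Int)) 0 else 0)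
                * PySem.Int.powMod pvB ((k : Int)).toNat pvP) pvP) pvP) []
            (fun g => g ++ [i])) PySem.Dict.empty).values := rfl
  rw [hraw, pvGenHash_length]
  have hrange : PySem.List.pyRange ((k : Int) - 1) (xs.length : Int) 1
      = (List.range (xs.length - k + 1)).map (fun (t : Nat) => ((k : Int) - 1) + (t : Int)) := by
    have h1 : (xs.length : Int) = ((k : Int) - 1) + ((xs.length - k + 1 : Nat) : Int) := by push_cast; omega
    rw [h1, pvRangeShift]
  rw [hrange, List.foldl_map]
  have hto : ((k : Int)).toNat = k := by omega
  rw [hto]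
  have hbody : (List.range (xs.length - k + 1)).foldl
      (fun (d : PySem.Dict Int (List Int)) (t : Nat) =>
        d.modify (PySem.Int.mod (PySem.List.pyGetD (pvGenHash xs) ((k : Int) - 1 + (t : Int)) 0 -
            PySem.Int.mod ((if ((k : Int) - 1 + (t : Int)) ≥ (k : Int) then
                PySem.List.pyGetD (pvGenHash xs) (((k : Int) - 1 + (t : Int)) - (k : Int)) 0 else 0)
              * PySem.Int.powMod pvB k pvP) pvP) pvP) []
          (fun g => g ++ [(k : Int) - 1 + (t : Int)])) PySem.Dict.empty
      = pvGDict xs k (xs.length - k + 1) := by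
    unfold pvGDict pvGroupPairs
    rw [List.foldl_map]
    apply PySem.List.foldl_congr_mem
    intro acc j hj
    have hjc : j < xs.length - k + 1 := List.mem_range.mp hj
    have hkey : PySem.Int.mod (PySem.List.pyGetD (pvGenHash xs) ((k : Int) - 1 + (j : Int)) 0 -
        PySem.Int.mod ((if ((k : Int) - 1 + (j : Int)) ≥ (k : Int) then
            PySem.List.pyGetD (pvGenHash xs) (((k : Int) - 1 + (j : Int)) - (k : Int)) 0 else 0)
          * PySem.Int.powMod pvB k pvP) pvP) pvP = pvF xs k j := by
      have := pvHshA_eq xs k hk ((k : Int) - 1 + (j : Int)) (by omega) (by omega)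
      rw [this]
      congr 1
      omega
    rw [hkey]
  rw [hbody]

theorem pvGroupPairs_fst (xs : List Int) (k c : Nat) :
    (pvGroupPairs xs k c).map Prod.fst = (List.range c).map (fun j => pvF xs k j) := by
  simp [pvGroupPairs, List.map_map, Function.comp_def]

theorem pvGDict_keys (xs : List Int) (k c : Nat) :
    (pvGDict xs k c).keys = PySem.Set.ofList ((List.range c).map (fun j => pvF xs k j)) := by
  unfold pvGDict
  rw [PySem.Dict.keys_foldl_modify_key (pvGroupPairs xs k c) Prod.fst [] (fun d p => fun g => g ++ [p.2]) PySem.Dict.empty]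
  rw [pvGroupPairs_fst]
  rfl

theorem pvGDict_nodup (xs : List Int) (k c : Nat) : (pvGDict xs k c).keys.Nodup := by
  unfold pvGDict
  exact PySem.Dict.nodup_keys_foldl_modify_key _ Prod.fst _ _ _ (by simp [PySem.Dict.keys_empty])

theorem pvGDict_getD (xs : List Int) (k c : Nat) (h : Int) :
    (pvGDict xs k c).getD h []
      = ((List.range c).filter (fun j => pvF xs k j == h)).map (fun (j : Nat) => (k : Int) - 1 + (j : Int)) := by
  unfold pvGDict
  rw [PySem.Dict.getD_foldl_modify_append]
  unfold pvGroupPairs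
  rw [List.filter_map, List.map_map]
  simp only [Function.comp_def]
  rfl

-- ===== B-side machinery =====

def pvS (xs : List Int) (k c : Nat) (h : Int) : List Nat :=
  (List.range c).filter (fun j => pvF xs k j == h)

def pvKeys (xs : List Int) (k c : Nat) : List Int :=
  PySem.Set.ofList ((List.range c).map (fun j => pvF xs k j))

def pvBlocks (pairs : List (Int × Int)) (ks : List Int) : List (Int × Int) :=
  ks.flatMap (fun h => pairs.filter (fun p => p.1 == h))

-- B's pairs list for k ≤ n is the range of window fingerprints pvF
theorem pvPairs_eq (cs : List Char) (k : Nat) (hk : k ≤ cs.length) :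
    pvPairs cs (k : Int)
      = (List.range (cs.length - k + 1)).map
          (fun j => (pvF (cs.map (fun c => (c.toNat : Int))) k j, (j : Int))) := by
  unfold pvPairs
  have hc : (cs.length : Int) - (k : Int) + 1 = ((cs.length - k + 1 : Nat) : Int) := by
    push_cast; omega
  rw [hc, PySem.List.pyRange_zero_nat, List.map_map]
  refine List.map_congr_left ?_
  intro j hj
  simp only [Function.comp_def]
  refine congrArg₂ Prod.mk ?_ rfl
  unfold pvWinHash pvF pvWin pvHm
  rw [PySem.List.slice_natCast_add cs j k, ← List.map_drop, ← List.map_take, List.foldl_map]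
  simp only [pvStep, pvMod_eq]

-- uniqueness: two key-nondecreasing permutations with the same per-key filters are equal
theorem pvSortedUnique (l1 : List (Int × Int)) : ∀ (l2 : List (Int × Int)),
    l1.Perm l2 → l1.Pairwise (fun a b => a.1 ≤ b.1) → l2.Pairwise (fun a b => a.1 ≤ b.1) →
    (∀ h : Int, l1.filter (fun p => p.1 == h) = l2.filter (fun p => p.1 == h)) → l1 = l2 := by
  induction l1 with
  | nil =>
      intro l2 hperm _ _ _
      exact (hperm.nil_eq).symm ▸ rfl
  | cons a t1 ih =>
      intro l2 hperm hpw1 hpw2 hfil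
      cases l2 with
      | nil => exact absurd hperm.eq_nil (by simp)
      | cons b t2 =>
      have hab : a.1 = b.1 := by
        have hbm : b ∈ a :: t1 := hperm.mem_iff.mpr (by simp)
        have ham : a ∈ b :: t2 := hperm.mem_iff.mp (by simp)
        have h1 : a.1 ≤ b.1 := by
          rcases List.mem_cons.mp hbm with rfl | hbt
          · exact le_rfl
          · exact List.rel_of_pairwise_cons hpw1 hbt
        have h2 : b.1 ≤ a.1 := by
          rcases List.mem_cons.mp ham with rfl | hat
          · exact le_rfl
          · exact List.rel_of_pairwise_cons hpw2 hat
        omega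
      have hfa := hfil a.1
      rw [List.filter_cons_of_pos (by simp), List.filter_cons_of_pos (by simp [hab])] at hfa
      have hba : a = b := (List.cons.injEq _ _ _ _ ▸ hfa).1
      subst hba
      have htf : ∀ h : Int, t1.filter (fun p => p.1 == h) = t2.filter (fun p => p.1 == h) := by
        intro h
        have := hfil h
        by_cases hh : a.1 = h
        · rw [List.filter_cons_of_pos (by simp [hh]), List.filter_cons_of_pos (by simp [hh])] at this
          exact (List.cons.injEq _ _ _ _ ▸ this).2
        · rwa [List.filter_cons_of_neg (by simp [hh]), List.filter_cons_of_neg (by simp [hh])] at this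
      have := ih t2 (List.Perm.cons_inv hperm) hpw1.of_cons hpw2.of_cons htf
      rw [this]

-- a stable insert preserves the per-key filters (appending at the key's run end)
theorem pvFilter_insertBy (x : Int × Int) : ∀ (ys : List (Int × Int)),
    ys.Pairwise (fun a b => a.1 ≤ b.1) → ∀ (h : Int),
    (PySem.List.insertBy (fun a b => decide (a.1 < b.1)) x ys).filter (fun p => p.1 == h)
      = ys.filter (fun p => p.1 == h) ++ (if x.1 == h then [x] else []) := by
  intro ys
  induction ys with
  | nil =>
      intro _ h
      rw [show PySem.List.insertBy (fun a b => decide (a.1 < b.1)) x [] = [x] from rfl]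
      by_cases hx : x.1 = h <;> simp [hx]
  | cons y ys ih =>
      intro hpw h
      rw [PySem.List.insertBy]
      by_cases hb : x.1 < y.1
      · rw [if_pos (by simpa using hb)]
        by_cases hx : x.1 = h
        · have hynil : (y :: ys).filter (fun p => p.1 == h) = [] := by
            refine List.filter_eq_nil_iff.mpr ?_
            intro p hp
            have : y.1 ≤ p.1 := by
              rcases List.mem_cons.mp hp with rfl | hpt
              · exact le_rfl
              · exact List.rel_of_pairwise_cons hpw hpt
            simp only [beq_iff_eq]
            omega
          rw [List.filter_cons_of_pos (by simp [hx]), hynil]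
          simp [hx]
        · rw [List.filter_cons_of_neg (by simp [hx])]
          simp [hx]
      · rw [if_neg (by simpa using hb)]
        by_cases hy : y.1 = h
        · rw [List.filter_cons_of_pos (by simp [hy]), List.filter_cons_of_pos (by simp [hy]),
            ih hpw.of_cons h, List.cons_append]
        · rw [List.filter_cons_of_neg (by simp [hy]), List.filter_cons_of_neg (by simp [hy]),
            ih hpw.of_cons h]

theorem pvFoldl_insertBy_filter (h : Int) : ∀ (l acc : List (Int × Int)),
    acc.Pairwise (fun a b => a.1 ≤ b.1) →
    ((l.foldl (fun acc x => PySem.List.insertBy (fun a b => decide (a.1 < b.1)) x acc) acc).filter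
        (fun p => p.1 == h))
      = acc.filter (fun p => p.1 == h) ++ l.filter (fun p => p.1 == h) := by
  intro l
  induction l with
  | nil => intro acc _; simp
  | cons x l ih =>
      intro acc hacc
      rw [List.foldl_cons, ih _ (PySem.List.insertBy_pairwise_le (fun p => p.1) x acc hacc),
        pvFilter_insertBy x acc hacc h, List.filter_cons, List.append_assoc]
      by_cases hx : x.1 = h <;> simp [hx]

-- stable insertion sort: filters at each key are preserved
theorem pvSorted_filter (pairs : List (Int × Int)) (h : Int) :
    (PySem.List.sorted pairs (fun p => p.1)).filter (fun p => p.1 == h)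
      = pairs.filter (fun p => p.1 == h) := by
  rw [PySem.List.sorted_eq_foldl_insertBy pairs (fun p => p.1),
    pvFoldl_insertBy_filter h pairs [] List.Pairwise.nil, List.filter_nil, List.nil_append]

theorem pvBlocks_congr (ks : List Int) (pairs pairs' : List (Int × Int))
    (h : ∀ h' ∈ ks, pairs.filter (fun p => p.1 == h') = pairs'.filter (fun p => p.1 == h')) :
    pvBlocks pairs ks = pvBlocks pairs' ks := by
  induction ks with
  | nil => rfl
  | cons h' ks ih =>
      unfold pvBlocks
      rw [List.flatMap_cons, List.flatMap_cons, h h' (by simp)]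
      refine congrArg _ ?_
      exact ih (fun h'' hm => h h'' (by simp [hm]))

theorem pvBlocks_perm (ks : List Int) : ∀ (pairs : List (Int × Int)),
    ks.Nodup → (∀ p ∈ pairs, p.1 ∈ ks) → (pvBlocks pairs ks).Perm pairs := by
  induction ks with
  | nil =>
      intro pairs _ hcov
      have : pairs = [] := List.eq_nil_iff_forall_not_mem.mpr (fun p hp => by cases hcov p hp)
      subst this
      rfl
  | cons h ks ih =>
      intro pairs hnd hcov
      have hstep : ∀ h' ∈ ks, pairs.filter (fun p => p.1 == h')
          = (pairs.filter (fun p => !(p.1 == h))).filter (fun p => p.1 == h') := by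
        intro h' hm
        rw [List.filter_filter]
        refine (List.filter_congr ?_).symm
        intro p _
        by_cases hph : p.1 = h'
        · have : h' ≠ h := fun hc => (List.nodup_cons.mp hnd).1 (hc ▸ hm)
          simp [hph, this]
        · simp [hph]
      show (pairs.filter (fun p => p.1 == h) ++ pvBlocks pairs ks).Perm pairs
      have h1 : pvBlocks pairs ks = pvBlocks (pairs.filter (fun p => !(p.1 == h))) ks :=
        pvBlocks_congr ks _ _ hstep
      have h2 : (pvBlocks (pairs.filter (fun p => !(p.1 == h))) ks).Perm
          (pairs.filter (fun p => !(p.1 == h))) := by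
        refine ih _ (List.nodup_cons.mp hnd).2 ?_
        intro p hp
        have hm := List.mem_filter.mp hp
        have := hcov p hm.1
        rcases List.mem_cons.mp this with hc | hc
        · exact absurd hc (by simpa using hm.2)
        · exact hc
      rw [h1]
      exact (h2.append_left _).trans (List.filter_append_perm _ _)

theorem pvBlocks_pairwise (ks : List Int) (pairs : List (Int × Int))
    (hks : ks.Pairwise (· < ·)) : (pvBlocks pairs ks).Pairwise (fun a b => a.1 ≤ b.1) := by
  induction ks with
  | nil => exact List.Pairwise.nil
  | cons h ks ih =>
      show ((pairs.filter (fun p => p.1 == h)) ++ pvBlocks pairs ks).Pairwise _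
      refine List.pairwise_append.mpr ⟨?_, ih hks.of_cons, ?_⟩
      · refine List.pairwise_of_forall_mem_list ?_
        intro a ha b hb
        have ha' : a.1 = h := by simpa using (List.mem_filter.mp ha).2
        have hb' : b.1 = h := by simpa using (List.mem_filter.mp hb).2
        rw [ha', hb']
      · intro a ha b hb
        have ha' : a.1 = h := by simpa using (List.mem_filter.mp ha).2
        obtain ⟨h', hh', hbf⟩ := List.mem_flatMap.mp hb
        have hb' : b.1 = h' := by simpa using (List.mem_filter.mp hbf).2
        have : h < h' := List.rel_of_pairwise_cons hks hh'
        rw [ha', hb']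
        omega

theorem pvBlocks_filter_mem (ks : List Int) (pairs : List (Int × Int)) (hnd : ks.Nodup) (h : Int) :
    (pvBlocks pairs ks).filter (fun p => p.1 == h)
      = if h ∈ ks then pairs.filter (fun p => p.1 == h) else [] := by
  induction ks with
  | nil => simp [pvBlocks]
  | cons h' ks ih =>
      show ((pairs.filter (fun p => p.1 == h')) ++ pvBlocks pairs ks).filter _ = _
      rw [List.filter_append, ih (List.nodup_cons.mp hnd).2]
      by_cases hhh : h = h'
      · subst hhh
        have hnm : h ∉ ks := (List.nodup_cons.mp hnd).1
        rw [if_neg hnm, if_pos (by simp)]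
        rw [List.filter_filter]
        rw [List.append_nil]
        refine List.filter_congr ?_
        intro p _
        by_cases hp : p.1 = h <;> simp [hp]
      · have h1 : (pairs.filter (fun p => p.1 == h')).filter (fun p => p.1 == h) = [] := by
          refine List.filter_eq_nil_iff.mpr ?_
          intro p hp
          have : p.1 = h' := by simpa using (List.mem_filter.mp hp).2
          simp [this, Ne.symm hhh]
        rw [h1, List.nil_append]
        by_cases hmem : h ∈ ks
        · rw [if_pos hmem, if_pos (by simp [hmem])]
        · rw [if_neg hmem, if_neg (by simp [hmem, hhh])]

theorem pvBlocks_filter (ks : List Int) (pairs : List (Int × Int)) (hnd : ks.Nodup)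
    (hcov : ∀ p ∈ pairs, p.1 ∈ ks) (h : Int) :
    (pvBlocks pairs ks).filter (fun p => p.1 == h) = pairs.filter (fun p => p.1 == h) := by
  rw [pvBlocks_filter_mem ks pairs hnd h]
  by_cases hmem : h ∈ ks
  · rw [if_pos hmem]
  · rw [if_neg hmem]
    refine (List.filter_eq_nil_iff.mpr ?_).symm
    intro p hp hc
    have hph : p.1 = h := by simpa using hc
    exact hmem (hph ▸ hcov p hp)

-- the sorted pairs list is exactly the concatenation of the per-key blocks,
-- keys in increasing order
theorem pvSorted_eq_blocks (pairs : List (Int × Int)) :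
    PySem.List.sorted pairs (fun p => p.1)
      = pvBlocks pairs (PySem.List.sorted (PySem.Set.ofList (pairs.map Prod.fst)) (fun x => x)) := by
  set ks := PySem.List.sorted (PySem.Set.ofList (pairs.map Prod.fst)) (fun x => x) with hks
  have hlt : ks.Pairwise (· < ·) := PySem.List.sorted_ofList_pairwise_lt _
  have hnd : ks.Nodup := hlt.imp (fun hab => ne_of_lt hab)
  have hcov : ∀ p ∈ pairs, p.1 ∈ ks := by
    intro p hp
    rw [hks, PySem.List.mem_sorted, PySem.Set.mem_ofList]
    exact List.mem_map_of_mem hp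
  refine pvSortedUnique _ _ ?_ ?_ ?_ ?_
  · exact (PySem.List.sorted_perm pairs (fun p => p.1) false).trans
      (pvBlocks_perm ks pairs hnd hcov).symm
  · exact PySem.List.sorted_pairwise pairs (fun p => p.1)
  · exact pvBlocks_pairwise ks pairs hlt
  · intro h
    rw [pvSorted_filter pairs h, pvBlocks_filter ks pairs hnd hcov h]

-- the run scan inside one equal-key run, then into the rest
theorem pvScan_run (kk : Int) (h : Int) (j0 : Int) : ∀ (ps rest : List (Int × Int)),
    (∀ p ∈ ps, p.1 = h) →
    pvScan kk (some h) j0 (ps ++ rest)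
      = (ps.any (fun e => decide (e.2 - j0 ≥ kk)) || pvScan kk (some h) j0 rest) := by
  intro ps
  induction ps with
  | nil => intro rest _; simp
  | cons p ps ih =>
      intro rest hall
      have hp : p.1 = h := hall p (by simp)
      rw [List.cons_append, pvScan, if_pos (by rw [hp])]
      by_cases hc : p.2 - j0 ≥ kk
      · simp [hc]
      · rw [if_neg hc, ih rest (fun q hq => hall q (by simp [hq]))]
        simp [hc]

-- the run scan over a block concatenation
theorem pvScan_blocks (kk : Int) (pairs : List (Int × Int)) : ∀ (ks : List Int)
    (cur : Option Int) (first : Int),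
    ks.Pairwise (· ≠ ·) → (∀ h ∈ ks, cur ≠ some h) →
    (∀ h ∈ ks, pairs.filter (fun p => p.1 == h) ≠ []) →
    pvScan kk cur first (pvBlocks pairs ks)
      = ks.any (fun h =>
          ((pairs.filter (fun p => p.1 == h)).tail).any
            (fun e => decide (e.2 - ((pairs.filter (fun p => p.1 == h)).headI).2 ≥ kk))) := by
  intro ks
  induction ks with
  | nil => intro cur first _ _ _; rfl
  | cons h ks ih =>
      intro cur first hpw hcur hne
      have hbne := hne h (by simp)
      obtain ⟨p0, ps, hfe⟩ := List.exists_cons_of_ne_nil hbne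
      have hmem0 : p0 ∈ pairs.filter (fun p => p.1 == h) := by rw [hfe]; simp
      have hp0 : p0.1 = h := by simpa using (List.mem_filter.mp hmem0).2
      have hall : ∀ p ∈ ps, p.1 = h := by
        intro p hp
        have : p ∈ pairs.filter (fun q => q.1 == h) := by rw [hfe]; simp [hp]
        simpa using (List.mem_filter.mp this).2
      show pvScan kk cur first ((pairs.filter (fun p => p.1 == h)) ++ pvBlocks pairs ks) = _
      rw [hfe, List.cons_append, pvScan, if_neg (by rw [hp0]; exact hcur h (by simp))]
      rw [hp0, pvScan_run kk h p0.2 ps (pvBlocks pairs ks) hall]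
      rw [ih (some h) p0.2 hpw.of_cons
        (fun h' hm => by simpa using (List.rel_of_pairwise_cons hpw hm))
        (fun h' hm => hne h' (by simp [hm]))]
      rw [List.any_cons, hfe]
      rfl

-- max of an ascending list is its last element
theorem pvLe_getLast (S : List Nat) (hS : S.Pairwise (· < ·)) (hne : S ≠ []) :
    ∀ j ∈ S, j ≤ S.getLast hne := by
  induction S with
  | nil => cases hne rfl
  | cons a t ih =>
      intro j hj
      cases t with
      | nil =>
          rw [List.mem_singleton.mp hj]
          simp
      | cons b t' =>
          rw [List.getLast_cons (by simp)]
          rcases List.mem_cons.mp hj with rfl | hjt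
          · have := List.rel_of_pairwise_cons hS (List.getLast_mem (l := b :: t') (by simp))
            omega
          · exact ih hS.of_cons (by simp) j hjt

-- per-key: B's run trigger is A's last-minus-first test (k ≥ 1)
theorem pvTrigger_iff (k : Nat) (hk : 1 ≤ k) (S : List Nat) (hS : S.Pairwise (· < ·))
    (hne : S ≠ []) :
    S.tail.any (fun j => decide ((j : Int) - ((S.headI : Nat) : Int) ≥ (k : Int)))
      = decide (((S.getLast?.getD 0 : Nat) : Int) - ((S.headI : Nat) : Int) ≥ (k : Int)) := by
  have hgd : S.getLast?.getD 0 = S.getLast hne := by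
    rw [List.getLast?_eq_some_getLast hne]
    rfl
  rw [hgd]
  cases S with
  | nil => cases hne rfl
  | cons j0 S' =>
      simp only [List.headI, List.tail_cons]
      cases S' with
      | nil =>
          simp only [List.any_nil, List.getLast_singleton]
          have hk0 : ¬ k = 0 := by omega
          simp [hk0]
      | cons j1 S'' =>
          have hgl : (j0 :: j1 :: S'').getLast hne = (j1 :: S'').getLast (by simp) :=
            List.getLast_cons (by simp)
          apply Bool.coe_iff_coe.mp
          simp only [List.any_eq_true, decide_eq_true_eq]
          constructor
          · rintro ⟨j, hj, hge⟩
            have hle : j ≤ (j1 :: S'').getLast (by simp) :=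
              pvLe_getLast (j1 :: S'') hS.of_cons (by simp) j hj
            rw [hgl]
            omega
          · intro hge
            refine ⟨(j1 :: S'').getLast (by simp), List.getLast_mem _, ?_⟩
            rw [hgl] at hge
            exact hge

-- the main per-length agreement, 1 ≤ k < n
theorem pvChkMain (cs : List Char) (k : Nat) (hk1 : 1 ≤ k) (hkn : k < cs.length) :
    pvChk (pvGenHash (cs.map (fun c => (c.toNat : Int)))) (k : Int)
      = if pvHasRepeat cs (k : Int) then 0 else 1 := by
  classical
  set xs := cs.map (fun c => (c.toNat : Int)) with hxs
  have hlenx : xs.length = cs.length := by simp [hxs]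
  set c := cs.length - k + 1 with hcc
  -- the common per-key condition: last start minus first start of the key's run
  set F : Int → Bool := fun h =>
    decide ((((pvS xs k c h).getLast?.getD 0 : Nat) : Int)
      - (((pvS xs k c h).headI : Nat) : Int) ≥ (k : Int)) with hF
  have hSfacts : ∀ h, h ∈ (List.range c).map (fun j => pvF xs k j) →
      pvS xs k c h ≠ [] ∧ (pvS xs k c h).Pairwise (· < ·) := by
    intro h hm
    obtain ⟨j, hj, hfj⟩ := List.mem_map.mp hm
    refine ⟨List.ne_nil_of_mem (List.mem_filter.mpr ⟨hj, by simp [hfj]⟩), ?_⟩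
    exact List.pairwise_lt_range.sublist List.filter_sublist
  -- ===== A side =====
  have hA : pvChk (pvGenHash xs) (k : Int)
      = if (pvKeys xs k c).any (fun h =>
            decide (PySem.List.pyGetD ((pvGDict xs k c).getD h []) (-1) 0
              - PySem.List.pyGetD ((pvGDict xs k c).getD h []) 0 0 ≥ (k : Int)))
        then 0 else 1 := by
    have := pvChkA_eq xs k hk1 (by omega)
    rw [hlenx] at this
    rw [this, pvChkScan_eq,
      PySem.Dict.values_eq_map_keys _ (pvGDict_nodup xs k c) [], List.any_map, pvGDict_keys]
    rfl
  have hkeyA : ∀ h ∈ pvKeys xs k c,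
      (decide (PySem.List.pyGetD ((pvGDict xs k c).getD h []) (-1) 0
        - PySem.List.pyGetD ((pvGDict xs k c).getD h []) 0 0 ≥ (k : Int))) = F h := by
    intro h hm
    have hm' : h ∈ (List.range c).map (fun j => pvF xs k j) :=
      (PySem.Set.mem_ofList _ _).mp hm
    obtain ⟨hSne, _⟩ := hSfacts h hm'
    set S := pvS xs k c h with hS
    have hg : (pvGDict xs k c).getD h [] = S.map (fun (j : Nat) => (k : Int) - 1 + (j : Int)) :=
      pvGDict_getD xs k c h
    obtain ⟨j0, S', hS0⟩ := List.exists_cons_of_ne_nil hSne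
    have hgne : (pvGDict xs k c).getD h [] ≠ [] := by rw [hg, hS0]; simp
    have hhead : PySem.List.pyGetD ((pvGDict xs k c).getD h []) 0 0 = (k : Int) - 1 + (j0 : Int) := by
      rw [PySem.List.pyGetD_of_nonneg _ _ le_rfl, hg, hS0]
      simp
    have hlastS : S.getLast? = some (S.getLast hSne) := List.getLast?_eq_some_getLast hSne
    have hgl? : ((pvGDict xs k c).getD h []).getLast?
        = some ((k : Int) - 1 + ((S.getLast hSne : Nat) : Int)) := by
      rw [hg, List.getLast?_map, hlastS]
      rfl
    have hlast : PySem.List.pyGetD ((pvGDict xs k c).getD h []) (-1) 0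
        = (k : Int) - 1 + ((S.getLast hSne : Nat) : Int) := by
      rw [PySem.List.pyGetD_neg_one _ _ hgne]
      have h2 := List.getLast?_eq_some_getLast hgne
      rw [hgl?] at h2
      exact (Option.some_inj.mp h2.symm)
    have hheadI : S.headI = j0 := by rw [hS0]; rfl
    have hgetD : S.getLast?.getD 0 = S.getLast hSne := by rw [hlastS]; rfl
    rw [hhead, hlast, hF]
    simp only [← hS, hgetD, hheadI]
    simp only [decide_eq_decide]
    omega
  -- ===== B side =====
  have hkle : k ≤ cs.length := le_of_lt hkn
  have hB : pvHasRepeat cs (k : Int)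
      = (PySem.List.sorted (pvKeys xs k c) (fun x => x)).any F := by
    unfold pvHasRepeat
    rw [pvPairs_eq cs k hkle]
    set pairs := (List.range c).map (fun j => (pvF xs k j, (j : Int))) with hpairs
    have hmapfst : pairs.map Prod.fst = (List.range c).map (fun j => pvF xs k j) := by
      rw [hpairs, List.map_map]
      rfl
    rw [pvSorted_eq_blocks pairs, hmapfst]
    set ks := PySem.List.sorted (PySem.Set.ofList ((List.range c).map fun j => pvF xs k j)) (fun x => x) with hks
    have hklt : ks.Pairwise (· < ·) := PySem.List.sorted_ofList_pairwise_lt _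
    have hkmem : ∀ h ∈ ks, h ∈ (List.range c).map (fun j => pvF xs k j) := by
      intro h hm
      rw [hks, PySem.List.mem_sorted, PySem.Set.mem_ofList] at hm
      exact hm
    have hfilter : ∀ h : Int, pairs.filter (fun p => p.1 == h)
        = (pvS xs k c h).map (fun (j : Nat) => (pvF xs k j, (j : Int))) := by
      intro h
      rw [hpairs, List.filter_map]
      rfl
    have hne' : ∀ h ∈ ks, pairs.filter (fun p => p.1 == h) ≠ [] := by
      intro h hm
      rw [hfilter h]
      intro hec
      exact (hSfacts h (hkmem h hm)).1 (List.map_eq_nil_iff.mp hec)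
    rw [pvScan_blocks (k : Int) pairs ks none 0 (hklt.imp ne_of_lt) (by intro h _; simp) hne']
    refine PySem.List.any_congr_mem ?_
    intro h hm
    obtain ⟨hSne, hSlt⟩ := hSfacts h (hkmem h hm)
    obtain ⟨j0, S', hS0⟩ := List.exists_cons_of_ne_nil hSne
    rw [hfilter h, hS0, List.map_cons, List.tail_cons, List.headI_cons, List.any_map]
    have hbody : ((fun e => decide (e.2 - ((fun (j : Nat) => (pvF xs k j, (j : Int))) j0).2 ≥ (k : Int)))
          ∘ (fun (j : Nat) => (pvF xs k j, (j : Int))))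
        = fun (j : Nat) => decide ((j : Int) - ((j0 : Nat) : Int) ≥ (k : Int)) := rfl
    rw [hbody]
    have htr := pvTrigger_iff k hk1 (pvS xs k c h) hSlt hSne
    rw [hS0] at htr
    simp only [List.tail_cons, List.headI_cons] at htr
    rw [hF]
    simp only [hS0, List.headI_cons]
    exact htr
  -- ===== assemble =====
  rw [hA, hB, PySem.List.any_congr_mem hkeyA,
    (PySem.List.sorted_perm (pvKeys xs k c) (fun x => x) false).any_eq]

def pvKey0 (v : List Int) (i : Int) : Int :=
  PySem.Int.mod (PySem.List.pyGetD v i 0 -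
    PySem.Int.mod ((if i ≥ (0 : Int) then PySem.List.pyGetD v (i - (0 : Int)) 0 else 0)
      * PySem.Int.powMod pvB ((0 : Int)).toNat pvP) pvP) pvP

theorem pvChk0 (v : List Int) (hv : v ≠ []) : pvChk v 0 = 0 := by
  classical
  have hlen : 0 < v.length := List.length_pos_iff.mpr hv
  have hraw : pvChk v 0 = pvChkScan 0
      ((PySem.List.pyRange (0 - 1) (v.length : Int)).foldl
        (fun (d : PySem.Dict Int (List Int)) i =>
          d.modify (pvKey0 v i) [] (fun g => g ++ [i])) PySem.Dict.empty).values := rfl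
  set I := PySem.List.pyRange (0 - 1) (v.length : Int) with hI
  set P0 := I.map (fun i => (pvKey0 v i, i)) with hP0
  have hpair : I.foldl (fun (d : PySem.Dict Int (List Int)) i =>
        d.modify (pvKey0 v i) [] (fun g => g ++ [i])) PySem.Dict.empty
      = P0.foldl (fun d p => d.modify p.1 [] (fun g => g ++ [p.2])) PySem.Dict.empty := by
    rw [hP0, List.foldl_map]
  set D := P0.foldl (fun (d : PySem.Dict Int (List Int)) p => d.modify p.1 [] (fun g => g ++ [p.2])) PySem.Dict.empty with hD
  have hnodup : D.keys.Nodup := by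
    rw [hD]
    exact PySem.Dict.nodup_keys_foldl_modify_key _ Prod.fst _ _ _ (by simp [PySem.Dict.keys_empty])
  have hkeys : D.keys = PySem.Set.ofList (P0.map Prod.fst) := by
    rw [hD, PySem.Dict.keys_foldl_modify_key _ Prod.fst [] (fun d p => fun g => g ++ [p.2])]
    rfl
  have hIcons : ∃ rest, I = (-1) :: rest := by
    rw [hI]
    refine ⟨PySem.List.pyRange (0 - 1 + 1) (v.length : Int), ?_⟩
    rw [PySem.List.pyRange_one_cons (by omega)]
    norm_num
  obtain ⟨rest, hIc⟩ := hIcons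
  have hmemI : (-1 : Int) ∈ I := by rw [hIc]; exact List.mem_cons_self
  set h0 := pvKey0 v (-1) with hh0
  have hkmem : h0 ∈ D.keys := by
    rw [hkeys]
    refine (PySem.Set.mem_ofList _ _).mpr ?_
    refine List.mem_map.mpr ⟨(h0, -1), ?_, rfl⟩
    exact List.mem_map.mpr ⟨-1, hmemI, rfl⟩
  have hg0 : D.getD h0 [] = ((P0.filter (fun p => p.1 == h0)).map Prod.snd) := by
    rw [hD, PySem.Dict.getD_foldl_modify_append]
    rfl
  have hfc : P0.filter (fun p => p.1 == h0)
      = (h0, -1) :: ((rest.map (fun i => (pvKey0 v i, i))).filter (fun p => p.1 == h0)) := by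
    rw [hP0, hIc, List.map_cons]
    rw [List.filter_cons_of_pos (by simp [hh0])]
  have hg0c : D.getD h0 [] = (-1) :: ((rest.map (fun i => (pvKey0 v i, i))).filter (fun p => p.1 == h0)).map Prod.snd := by
    rw [hg0, hfc, List.map_cons]
  have hg0ne : D.getD h0 [] ≠ [] := by rw [hg0c]; simp
  have hbound : ∀ x ∈ D.getD h0 [], (-1 : Int) ≤ x := by
    intro x hx
    rw [hg0] at hx
    obtain ⟨p, hp, hpx⟩ := List.mem_map.mp hx
    have hpP0 : p ∈ P0 := List.mem_of_mem_filter hp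
    rw [hP0] at hpP0
    obtain ⟨i, hiI, hip⟩ := List.mem_map.mp hpP0
    have hxi : x = i := by rw [← hip] at hpx; simpa using hpx.symm
    have hge : (0 : Int) - 1 ≤ i := ((PySem.List.mem_pyRange_one).mp (hI ▸ hiI)).1
    omega
  have hhead : PySem.List.pyGetD (D.getD h0 []) 0 0 = -1 := by
    rw [PySem.List.pyGetD_of_nonneg _ _ le_rfl, hg0c]
    simp
  have hlastmem : (D.getD h0 []).getLast hg0ne ∈ D.getD h0 [] := List.getLast_mem hg0ne
  have hcond : PySem.List.pyGetD (D.getD h0 []) (-1) 0 - PySem.List.pyGetD (D.getD h0 []) 0 0 ≥ (0 : Int) := by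
    rw [PySem.List.pyGetD_neg_one _ _ hg0ne, hhead]
    have := hbound _ hlastmem
    omega
  have hval : D.getD h0 [] ∈ D.values := by
    rw [PySem.Dict.values_eq_map_keys D hnodup []]
    exact List.mem_map.mpr ⟨h0, hkmem, rfl⟩
  have hany : D.values.any (fun g => decide (PySem.List.pyGetD g (-1) 0 - PySem.List.pyGetD g 0 0 ≥ (0 : Int))) = true := by
    refine List.any_eq_true.mpr ⟨D.getD h0 [], hval, by simpa using hcond⟩
  rw [hraw, hpair, pvChkScan_eq, hany]
  rfl

theorem pvHasRepeat0 (cs : List Char) (hcs : 1 ≤ cs.length) : pvHasRepeat cs 0 = true := by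
  unfold pvHasRepeat
  rw [show (0 : Int) = ((0 : Nat) : Int) from rfl, pvPairs_eq cs 0 (by omega)]
  have hpair : (List.range (cs.length - 0 + 1)).map
        (fun j => (pvF (cs.map (fun c => (c.toNat : Int))) 0 j, (j : Int)))
      = (List.range (cs.length + 1)).map (fun (j : Nat) => ((0 : Int), (j : Int))) := by
    simp only [Nat.sub_zero]
    refine List.map_congr_left ?_
    intro j _
    rfl
  rw [hpair]
  rw [PySem.List.sorted_eq_self_of_pairwise _ _ (by
    refine List.pairwise_of_forall_mem_list ?_
    intro a ha b hb
    obtain ⟨_, _, rfl⟩ := List.mem_map.mp ha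
    obtain ⟨_, _, rfl⟩ := List.mem_map.mp hb
    exact le_rfl)]
  obtain ⟨m, hm⟩ : ∃ m, cs.length = m + 1 := ⟨cs.length - 1, by omega⟩
  rw [hm]
  rw [show m + 1 + 1 = m + 2 from rfl, List.range_succ_eq_map, List.range_succ_eq_map]
  simp only [List.map_cons, List.map_map]
  simp [pvScan]

theorem pvChkFull (cs : List Char) (kk : Int) (h0 : 0 ≤ kk) (h1 : kk < (cs.length : Int)) :
    pvChk (pvGenHash (cs.map (fun c => (c.toNat : Int)))) kk < 1 ↔ pvHasRepeat cs kk = true := by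
  have hxne : cs ≠ [] := by
    intro h; rw [h] at h1; simp at h1; omega
  by_cases hz : kk = 0
  · subst hz
    constructor
    · intro _; exact pvHasRepeat0 cs (by cases cs <;> simp_all)
    · intro _
      rw [pvChk0 (pvGenHash (cs.map (fun c => (c.toNat : Int)))) (by
        intro h
        have hgl := pvGenHash_length (cs.map (fun c => (c.toNat : Int)))
        rw [h] at hgl
        simp at hgl
        exact hxne (List.eq_nil_of_length_eq_zero hgl.symm))]
      norm_num
  · have hk1 : 1 ≤ kk.toNat := by omega
    have hkk : kk = ((kk.toNat : Nat) : Int) := by omega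
    rw [hkk, pvChkMain cs kk.toNat hk1 (by omega)]
    by_cases hr : pvHasRepeat cs ((kk.toNat : Nat) : Int) = true
    · rw [if_pos hr]
      exact ⟨fun _ => hr, fun _ => by norm_num⟩
    · rw [if_neg hr]
      exact ⟨fun hx => absurd hx (by norm_num), fun hx => absurd hx hr⟩

theorem pvBisectEq (cs : List Char) : ∀ (N : Nat) (lo hi : Int), (hi - lo).toNat ≤ N →
    0 ≤ lo → hi ≤ (cs.length : Int) →
    pvBisect (pvGenHash (cs.map (fun c => (c.toNat : Int)))) lo hi = pvSearch cs lo hi := by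
  intro N
  induction N with
  | zero =>
      intro lo hi hN hlo hhi
      have : ¬ lo < hi := by omega
      rw [pvBisect, pvSearch, dif_neg this, dif_neg this]
  | succ N ih =>
      intro lo hi hN hlo hhi
      by_cases hlt : lo < hi
      · rw [pvBisect, pvSearch, dif_pos hlt, dif_pos hlt]
        have hmid := PySem.Int.floordiv_two_mid_bounds (le_of_lt hlt)
        have hmlt : PySem.Int.floordiv (lo + hi) 2 < hi :=
          (PySem.Int.floordiv_lt_iff_lt_mul (a := lo + hi) (b := 2) (q := hi) (by norm_num)).mpr (by omega)
        set mid := PySem.Int.floordiv (lo + hi) 2 with hm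
        have hcond := pvChkFull cs mid (by omega) (by omega)
        by_cases hr : pvHasRepeat cs mid = true
        · rw [if_pos (hcond.mpr hr), if_pos hr]
          exact ih (mid + 1) hi (by omega) (by omega) hhi
        · rw [if_neg (fun hc => hr (hcond.mp hc)), if_neg hr]
          exact ih lo mid (by omega) hlo (by omega)
      · rw [pvBisect, pvSearch, dif_neg hlt, dif_neg hlt]

-- ===== VERDICT (by name: the statement is the Claim_ definition above) =====
theorem double_substring_spec : Claim_equal_double_substring := by
  intro s _
  unfold Spec_double_substring double_substring double_substring_alt
  by_cases he : s.toList = []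
  · rw [if_pos he, if_pos (by simp [he])]
  · rw [if_neg he, if_neg (by simpa using he)]
    show pvBisect (pvGenHash (pvOrds s)) 0 ((pvOrds s).length : Int) - 1
        = pvSearch s.toList 0 (s.toList.length : Int) - 1
    have hords : pvOrds s = s.toList.map (fun c => (c.toNat : Int)) := rfl
    have hl : ((pvOrds s).length : Int) = (s.toList.length : Int) := by simp [pvOrds]
    rw [hl, hords]
    rw [pvBisectEq s.toList s.toList.length 0 ((s.toList.length : Int)) (by omega) le_rfl le_rfl]
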